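-- pv_equiv track=rewrite | github.com/cog-model/AmbiK-dataset | noplans_lofree/calibrate.py | filter_similar_sentences
-- ===== SOURCE A (Python) =====
-- def filter_similar_sentences(A, B):
--     """
--     Фильтрует словарь A, оставляя только те предложения, которые по смыслу похожи на предложения из списка B.
--
--     :param A: Словарь с предложениями для фильтрации
--     :param B: Список предложений для сравнения
--     :param threshold: Порог схожести для сравнения предложений (по умолчанию 0.7)
--     :return: Отфильтрованный словарь
--     """
--
--     # Функция для удаления частей "A)", "B)", и т.д.
--
--     def is_similar(sent1, sent2):
--         right = 0
--         splitted = sent2.split(', ')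
--         total = len(splitted)
--         target = sent1.lower()
--         for el in splitted:
--             if el.startswith('-'):
--                 flag = False
--                 variables = el.replace('-', '')
--                 variables = variables.split('|')
--                 for var in variables:
--                     if ' '+var in target:
--                         flag = True
--                 if flag == False:
--                     right += 1
--             else:
--                 flag = False
--                 variables = el.split('|')
--                 for var in variables:
--                     if ' '+var in target:
--                         flag = True
--                 if flag == True:
--                     right += 1
--
--         if right == total:
--             similarity = True
--         else:
--             similarity = False
--
--         return similarity
--
--     filtered_A = {}
--     for sentence_A, score in A.items():
--         if any(is_similar(sentence_A, sentence_B) for sentence_B in B): #processed_B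
--             filtered_A[sentence_A] = score
--     return filtered_A
-- ===== SOURCE B (Python) =====
-- def filter_similar_sentences(A, B):
--     # Data-parallel mask algorithm: loops are inverted (B-patterns outer, A inner).
--     # Each B pattern is swept across ALL A sentences at once, maintaining boolean
--     # hit/ok/keep masks over A that are combined by set algebra, instead of A's
--     # per-(A,B)-pair counter test.
--     items = list(A.items())
--     targets = [k.lower() for k, _ in items]
--     n = len(items)
--     keep = [False] * n
--     for sentence_B in B:
--         ok = [True] * n
--         for el in sentence_B.split(', '):
--             neg = el.startswith('-')
--             variants = (el.replace('-', '') if neg else el).split('|')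
--             hit = [False] * n
--             for v in variants:
--                 pat = ' ' + v
--                 for i in range(n):
--                     if not hit[i] and pat in targets[i]:
--                         hit[i] = True
--             for i in range(n):
--                 if ok[i] and hit[i] == neg:
--                     ok[i] = False
--         for i in range(n):
--             if ok[i]:
--                 keep[i] = True
--     return {k: v for (k, v), kp in zip(items, keep) if kp}
-- ===== Notes on version B (the rewrite author's own statement) =====
-- stated objective: faster
-- what changed: B inverts the loop nesting: each B pattern is parsed once and swept across all A sentences at once via boolean hit/ok/keep masks over A combined by set algebra, instead of A's per-(A,B)-pair re-parsing with a right/total counter.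
import Mathlib
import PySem

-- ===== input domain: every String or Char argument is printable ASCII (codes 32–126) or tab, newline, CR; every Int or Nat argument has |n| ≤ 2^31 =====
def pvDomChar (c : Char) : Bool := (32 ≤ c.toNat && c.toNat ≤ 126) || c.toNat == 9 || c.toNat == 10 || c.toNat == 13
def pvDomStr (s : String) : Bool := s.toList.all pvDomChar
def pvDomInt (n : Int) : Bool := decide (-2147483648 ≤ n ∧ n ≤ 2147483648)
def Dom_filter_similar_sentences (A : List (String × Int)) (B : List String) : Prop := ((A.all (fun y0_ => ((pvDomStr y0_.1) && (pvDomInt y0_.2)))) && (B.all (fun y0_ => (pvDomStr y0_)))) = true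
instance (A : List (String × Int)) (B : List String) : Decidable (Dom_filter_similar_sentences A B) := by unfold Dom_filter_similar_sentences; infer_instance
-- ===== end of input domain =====

-- B uses a data-parallel mask algorithm: the loop nesting is inverted (B patterns outer,
-- A inner), sweeping each pattern across boolean hit/ok/keep masks over all of A at once,
-- instead of A's per-(A,B)-pair parsing with a right/total counter (alternative decomposition).


-- ===== PORT A =====
-- is_similar: split sent2 on ', ', count satisfied comma-tokens in `right`, compare with total.
-- (The string concatenation ' '+var is ported exactly as ' ' :: var on the List Char level.)
def pvIsSimilar (sent1 sent2 : String) : Bool :=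
  let splitted := PySem.Chars.splitOn sent2.toList (", ".toList)
  let total : Int := (splitted.length : Int)
  let target := PySem.Chars.lower sent1.toList
  let right : Int := splitted.foldl (fun right el =>
    if PySem.Chars.startswith el ['-'] then
      let variants := PySem.Chars.splitOn (PySem.Chars.replace el ['-'] []) ['|']
      let flag := variants.foldl (fun flag var =>
        if PySem.Chars.isIn (' ' :: var) target then true else flag) false
      if flag = false then right + 1 else right
    else
      let variants := PySem.Chars.splitOn el ['|']
      let flag := variants.foldl (fun flag var =>
        if PySem.Chars.isIn (' ' :: var) target then true else flag) false
      if flag = true then right + 1 else right) 0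
  right == total

-- dict filtered_A: each kept key of A is fresh there, so insertion appends at the end.
def filter_similar_sentences (A : List (String × Int)) (B : List String) : List (String × Int) :=
  A.foldl (fun filtered_A p =>
    if B.any (fun sentence_B => pvIsSimilar p.1 sentence_B) then filtered_A ++ [p]
    else filtered_A) []

-- ===== PORT B =====
-- inner variant loop: sweep pattern ' '+v across the whole hit mask (the Python
-- `for i in range(n)` over two same-length lists is ported as zipWith over them)
def pvHitLoop (targets : List (List Char)) (variants : List (List Char)) : List Bool :=
  variants.foldl (fun hit v =>
    hit.zipWith (fun h t => if !h && PySem.Chars.isIn (' ' :: v) t then true else h) targets)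
    (List.replicate targets.length false)

-- token loop: combine each token's hit mask into the ok mask
def pvOkLoop (targets : List (List Char)) (tokens : List (List Char)) : List Bool :=
  tokens.foldl (fun ok el =>
    let neg := PySem.Chars.startswith el ['-']
    let variants := PySem.Chars.splitOn (if neg then PySem.Chars.replace el ['-'] [] else el) ['|']
    let hit := pvHitLoop targets variants
    ok.zipWith (fun o h => if o && (h == neg) then false else o) hit)
    (List.replicate targets.length true)

def filter_similar_sentences_alt (A : List (String × Int)) (B : List String) : List (String × Int) :=
  let targets := A.map (fun p => PySem.Chars.lower p.1.toList)
  let keep := B.foldl (fun keep sB =>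
      let ok := pvOkLoop targets (PySem.Chars.splitOn sB.toList (", ".toList))
      keep.zipWith (fun k o => if o then true else k) ok)
    (List.replicate targets.length false)
  (A.zip keep).filterMap (fun pk => if pk.2 then some pk.1 else none)

-- ===== PRECONDITION & SPEC =====
def Spec_filter_similar_sentences (A : List (String × Int)) (B : List String) (out : List (String × Int)) : Prop := out = filter_similar_sentences_alt A B
instance (A : List (String × Int)) (B : List String) (out : List (String × Int)) : Decidable (Spec_filter_similar_sentences A B out) := by unfold Spec_filter_similar_sentences; infer_instance

-- ===== CLAIM (what is proved, stated in full; the proofs are below) =====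
def Claim_equal_filter_similar_sentences : Prop := ∀ (A : List (String × Int)) (B : List String), Dom_filter_similar_sentences A B → Spec_filter_similar_sentences A B (filter_similar_sentences A B)

-- ===== LEMMAS AND PROOFS =====

-- zipWith with the same right list twice composes
theorem pv_zipWith_comp {α β : Type} (f g : α → β → α) (m : List α) (t : List β) :
    List.zipWith f (List.zipWith g m t) t = List.zipWith (fun b x => f (g b x) x) m t := by
  induction m generalizing t with
  | nil => simp
  | cons a as ih => cases t with
    | nil => simp
    | cons b bs => simp [ih]

theorem pv_zipWith_fst {α β : Type} (m : List α) (t : List β) (h : m.length ≤ t.length) :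
    List.zipWith (fun b (_ : β) => b) m t = m := by
  induction m generalizing t with
  | nil => simp
  | cons a as ih => cases t with
    | nil => simp at h
    | cons b bs => simp only [List.zipWith_cons_cons]; rw [ih bs (by simpa using h)]

theorem pv_zipWith_replicate {α β : Type} (f : α → β → α) (c : α) (t : List β) :
    List.zipWith f (List.replicate t.length c) t = t.map (f c) := by
  induction t with
  | nil => simp
  | cons b bs ih => simp [List.replicate_succ, ih]

-- a fold of pointwise zipWith mask updates is the pointwise fold
theorem pv_foldl_zipWith {σ β : Type} (s : σ → Bool → β → Bool) (L : List σ)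
    (t : List β) (m : List Bool) (hm : m.length = t.length) :
    L.foldl (fun ok el => List.zipWith (s el) ok t) m
    = List.zipWith (fun o x => L.foldl (fun b el => s el b x) o) m t := by
  induction L generalizing m with
  | nil => simp [pv_zipWith_fst m t (le_of_eq hm)]
  | cons el L ih =>
    simp only [List.foldl_cons]
    rw [ih _ (by simp [hm]), pv_zipWith_comp]

-- A's flag-setting inner loop computes `b || any`
theorem pv_foldl_flag {α : Type} (P : α → Bool) (l : List α) (b : Bool) :
    l.foldl (fun flag var => if P var then true else flag) b = (b || l.any P) := by
  induction l generalizing b with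
  | nil => simp
  | cons x xs ih =>
    simp only [List.foldl_cons, List.any_cons, ih]
    by_cases h : P x = true <;> simp [h]

-- pointwise value of the hit mask
theorem pv_foldl_and {α : Type} (P : α → Bool) (l : List α) (b : Bool) :
    l.foldl (fun b el => if b && P el then false else b) b = (b && l.all (fun el => !P el)) := by
  induction l generalizing b with
  | nil => simp
  | cons x xs ih =>
    simp only [List.foldl_cons, List.all_cons, ih]
    cases b <;> by_cases h : P x = true <;> simp [h]

theorem pv_hitLoop_eq (targets variants : List (List Char)) :
    pvHitLoop targets variants
    = targets.map (fun t => variants.any (fun v => PySem.Chars.isIn (' ' :: v) t)) := by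
  unfold pvHitLoop
  rw [pv_foldl_zipWith (fun v h t => if !h && PySem.Chars.isIn (' ' :: v) t then true else h)
      variants targets _ (by simp), pv_zipWith_replicate]
  apply List.map_congr_left
  intro t _
  rw [show (fun (b : Bool) (el : List Char) => if (!b && PySem.Chars.isIn (' ' :: el) t) = true then true else b)
      = (fun (b : Bool) el => if PySem.Chars.isIn (' ' :: el) t = true then true else b) from by
    funext b el; cases b <;> by_cases h : PySem.Chars.isIn (' ' :: el) t = true <;> simp [h]]
  rw [pv_foldl_flag]
  simp

-- the per-token requirement, pointwise on one lowered target
def pvTokReq (el : List Char) (t : List Char) : Bool :=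
  let neg := PySem.Chars.startswith el ['-']
  let hit := (PySem.Chars.splitOn (if neg then PySem.Chars.replace el ['-'] [] else el) ['|']).any
      (fun v => PySem.Chars.isIn (' ' :: v) t)
  if neg then !hit else hit

-- pointwise value of the ok mask
theorem pv_okLoop_eq (targets tokens : List (List Char)) :
    pvOkLoop targets tokens = targets.map (fun t => tokens.all (fun el => pvTokReq el t)) := by
  unfold pvOkLoop
  simp only [pv_hitLoop_eq, List.zipWith_map_right]
  rw [pv_foldl_zipWith (fun (el : List Char) (a : Bool) (b : List Char) =>
      if (a && (((PySem.Chars.splitOn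
              (if PySem.Chars.startswith el ['-'] then PySem.Chars.replace el ['-'] [] else el)
              ['|']).any (fun v => PySem.Chars.isIn (' ' :: v) b)) == PySem.Chars.startswith el ['-']))
      then false else a) tokens targets _ (by simp), pv_zipWith_replicate]
  apply List.map_congr_left
  intro t _
  rw [pv_foldl_and]
  simp only [Bool.true_and]
  apply congrArg (List.all tokens)
  funext el
  unfold pvTokReq
  by_cases hn : PySem.Chars.startswith el ['-'] = true <;> simp [hn]

-- `count of satisfied tokens == total` equals `all tokens satisfied`
theorem pv_count_all {α : Type} (P : α → Bool) (sp : List α) :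
    (((sp.countP P : Int)) == (sp.length : Int)) = sp.all P := by
  by_cases hc : sp.countP P = sp.length
  · rw [hc]
    simp only [beq_self_eq_true]
    symm
    rw [List.countP_eq_length] at hc
    rw [List.all_eq_true]
    exact hc
  · have hne : ((sp.countP P : Int) == (sp.length : Int)) = false := by
      rw [beq_eq_false_iff_ne]; exact_mod_cast hc
    rw [hne]
    symm
    rw [Bool.eq_false_iff, Ne, List.all_eq_true]
    intro hall
    exact hc (List.countP_eq_length.mpr hall)

-- A's per-pair test equals the pointwise all-tokens predicate
theorem pv_isSimilar_eq (s1 s2 : String) :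
    pvIsSimilar s1 s2
    = (PySem.Chars.splitOn s2.toList (", ".toList)).all
        (fun el => pvTokReq el (PySem.Chars.lower s1.toList)) := by
  unfold pvIsSimilar
  simp only [pv_foldl_flag, Bool.false_or]
  set target := PySem.Chars.lower s1.toList
  set sp := PySem.Chars.splitOn s2.toList (", ".toList)
  have hc := PySem.List.foldl_count_if (fun el => pvTokReq el target) sp (0 : Int)
  simp only [zero_add] at hc
  rw [show (fun (right : Int) el =>
      if PySem.Chars.startswith el ['-'] then
        (if ((PySem.Chars.splitOn (PySem.Chars.replace el ['-'] []) ['|']).any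
              (fun var => PySem.Chars.isIn (' ' :: var) target)) = false then right + 1 else right)
      else
        (if ((PySem.Chars.splitOn el ['|']).any
              (fun var => PySem.Chars.isIn (' ' :: var) target)) = true then right + 1 else right))
    = (fun (acc : Int) x => if pvTokReq x target = true then acc + 1 else acc) from ?_, hc]
  · exact pv_count_all _ sp
  · funext acc x
    unfold pvTokReq
    by_cases hneg : PySem.Chars.startswith x ['-'] = true <;> simp [hneg]

-- zipped filterMap over a parallel map is a filter
theorem pv_zip_map_filter {α : Type} (A : List α) (f : α → Bool) :
    (A.zip (A.map f)).filterMap (fun pk => if pk.2 then some pk.1 else none) = A.filter f := by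
  induction A with
  | nil => rfl
  | cons a as ih =>
    simp only [List.map_cons, List.zip_cons_cons, List.filterMap_cons, List.filter_cons]
    by_cases h : f a = true <;> simp [h, ih]

-- A's dict-building fold is a filter
theorem pv_foldl_filter (A : List (String × Int)) (P : String × Int → Bool) (acc : List (String × Int)) :
    A.foldl (fun r p => if P p then r ++ [p] else r) acc = acc ++ A.filter P := by
  induction A generalizing acc with
  | nil => simp
  | cons a as ih =>
    simp only [List.foldl_cons, List.filter_cons]
    by_cases h : P a = true <;> simp [h, ih]

theorem pv_outer (A : List (String × Int)) (B : List String) :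
    filter_similar_sentences A B = filter_similar_sentences_alt A B := by
  unfold filter_similar_sentences filter_similar_sentences_alt
  simp only [pv_okLoop_eq, List.zipWith_map_right, List.length_map]
  rw [pv_foldl_zipWith (fun (sB : String) (a : Bool) (b : String × Int) =>
      if ((PySem.Chars.splitOn sB.toList (", ".toList)).all
            (fun el => pvTokReq el (PySem.Chars.lower b.1.toList)))
      then true else a) B A _ (by simp), pv_zipWith_replicate]
  rw [pv_zip_map_filter, pv_foldl_filter, List.nil_append]
  apply List.filter_congr
  intro p _
  rw [show (fun sentence_B => pvIsSimilar p.1 sentence_B)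
      = (fun sB => (PySem.Chars.splitOn sB.toList (", ".toList)).all
          (fun el => pvTokReq el (PySem.Chars.lower p.1.toList))) from funext (fun sB => pv_isSimilar_eq p.1 sB)]
  rw [pv_foldl_flag]
  simp

-- ===== VERDICT (by name: the statement is the Claim_ definition above) =====
theorem filter_similar_sentences_spec : Claim_equal_filter_similar_sentences := by
  intro A B _
  unfold Spec_filter_similar_sentences
  exact pv_outer A B
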